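-- pv_equiv track=rewrite | github.com/Alekhyadantuluri/leetcode_j7 | 1750-minimum-length-of-string-after-deleting-similar-ends/1750-minimum-length-of-string-after-deleting-similar-ends.py | minimumLength
-- ===== SOURCE A (Python) =====
-- def minimumLength(s: str) -> int:
--     # k=len(s)
--     i=0
--     j=len(s)-1
--     # mt=''
--     while(i<j):
--         if s[i]==s[j]:
--             while(i+1<j and s[i]==s[i+1]):
--                 i+=1
--             while(i<j-1 and s[j]==s[j-1]):
--                 j-=1
--             i+=1
--             j-=1
--         else:
--             return j-i+1
--     return j-i+1
-- ===== SOURCE B (Python) =====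
-- def minimumLength(s: str) -> int:
--     while len(s) >= 2 and s[0] == s[-1]:
--         s = s.strip(s[0])
--     return len(s)
-- ===== Notes on version B (the rewrite author's own statement) =====
-- stated objective: idiomatic
-- what changed: Replaces A's manual two-pointer index loop with nested run-skipping inner whiles by the idiomatic 3-line loop that repeatedly strips the common end character with str.strip, which runs the per-character work at C speed.
import Mathlib
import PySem

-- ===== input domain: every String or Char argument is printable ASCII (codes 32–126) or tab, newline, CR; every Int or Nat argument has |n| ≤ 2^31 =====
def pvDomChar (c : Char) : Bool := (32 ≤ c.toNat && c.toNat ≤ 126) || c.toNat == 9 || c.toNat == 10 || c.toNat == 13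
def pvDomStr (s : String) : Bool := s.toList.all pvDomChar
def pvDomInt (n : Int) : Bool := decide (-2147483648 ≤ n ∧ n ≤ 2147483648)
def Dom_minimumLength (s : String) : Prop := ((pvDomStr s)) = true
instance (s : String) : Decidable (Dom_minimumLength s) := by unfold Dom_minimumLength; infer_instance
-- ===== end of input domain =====

-- B replaces A's index-based two-pointer loop by the idiomatic "repeatedly strip the matching
-- end character" loop; same return value on every string (proved below), no speed claim.
-- The fuel parameters are totality guards only; each call site supplies enough fuel.

-- ===== PORT A =====
-- inner while: while i+1 < j and s[i] == s[i+1]: i += 1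
-- (whenever an index is read we have 0 ≤ i < j < len, so Option equality is exact)
def aSkipI (cs : List Char) (fuel : Nat) (i j : Int) : Int :=
  match fuel with
  | 0 => i
  | fuel' + 1 =>
    if i + 1 < j ∧ PySem.List.pyGet? cs i = PySem.List.pyGet? cs (i + 1) then
      aSkipI cs fuel' (i + 1) j
    else i

-- inner while: while i < j-1 and s[j] == s[j-1]: j -= 1
def aSkipJ (cs : List Char) (fuel : Nat) (i j : Int) : Int :=
  match fuel with
  | 0 => j
  | fuel' + 1 =>
    if i < j - 1 ∧ PySem.List.pyGet? cs j = PySem.List.pyGet? cs (j - 1) then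
      aSkipJ cs fuel' i (j - 1)
    else j

-- outer while of A (the loop runs at most (j-i) times; each inner while at most j-i times)
def aLoop (cs : List Char) (fuel : Nat) (i j : Int) : Int :=
  match fuel with
  | 0 => j - i + 1
  | fuel' + 1 =>
    if i < j then
      if PySem.List.pyGet? cs i = PySem.List.pyGet? cs j then
        let i' := aSkipI cs (j - i).toNat i j
        let j' := aSkipJ cs (j - i').toNat i' j
        aLoop cs fuel' (i' + 1) (j' - 1)
      else j - i + 1
    else j - i + 1

def minimumLength (s : String) : Int :=
  aLoop s.toList (s.toList.length + 1) 0 ((s.toList.length : Int) - 1)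

-- ===== PORT B =====
-- s.strip(c): drop c from the left, then from the right (exact for a one-character argument)
def bStrip (c : Char) (l : List Char) : List Char :=
  ((l.dropWhile (· == c)).reverse.dropWhile (· == c)).reverse

-- while len(s) >= 2 and s[0] == s[-1]: s = s.strip(s[0])
-- (each pass strips at least one character, so l.length passes suffice)
def bLoop (fuel : Nat) (l : List Char) : Int :=
  match fuel with
  | 0 => (l.length : Int)
  | fuel' + 1 =>
    if 2 ≤ l.length ∧ PySem.List.pyGet? l 0 = PySem.List.pyGet? l (-1) then
      bLoop fuel' (bStrip (l.headD default) l)   -- s[0] read as headD: l is nonempty under the guard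
    else (l.length : Int)

def minimumLength_alt (s : String) : Int := bLoop s.toList.length s.toList

-- ===== PRECONDITION & SPEC =====
def Spec_minimumLength (s : String) (out : Int) : Prop := out = minimumLength_alt s
instance (s : String) (out : Int) : Decidable (Spec_minimumLength s out) := by unfold Spec_minimumLength; infer_instance

-- ===== CLAIM (what is proved, stated in full; the proofs are below) =====
def Claim_equal_minimumLength : Prop := ∀ (s : String), Dom_minimumLength s → Spec_minimumLength s (minimumLength s)

-- ===== LEMMAS AND PROOFS =====

-- the sub-slice of cs from index i to index j inclusive
def seg (cs : List Char) (i j : Nat) : List Char := (cs.drop i).take (j + 1 - i)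

lemma seg_length (cs : List Char) (i j : Nat) (h1 : i ≤ j + 1) (h2 : j < cs.length) :
    (seg cs i j).length = j + 1 - i := by
  simp [seg]; omega

lemma seg_getElem? (cs : List Char) (i j k : Nat) (hk : k < j + 1 - i) :
    (seg cs i j)[k]? = cs[i + k]? := by
  simp [seg, hk]

lemma seg_split (cs : List Char) (i m j : Nat) (h1 : i ≤ m + 1) (h2 : m ≤ j) :
    seg cs i j = seg cs i m ++ seg cs (m + 1) j := by
  unfold seg
  rw [show j + 1 - i = (m + 1 - i) + (j + 1 - (m + 1)) by omega, List.take_add, List.drop_drop,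
    show i + (m + 1 - i) = m + 1 by omega]

lemma seg_all_eq (cs : List Char) (i j : Nat) (c : Char)
    (h : ∀ k, i ≤ k → k ≤ j → cs[k]? = some c) :
    ∀ x ∈ seg cs i j, x = c := by
  intro x hx
  obtain ⟨k, hk⟩ := List.mem_iff_getElem?.mp hx
  have hlen : k < j + 1 - i := by
    obtain ⟨hlt, -⟩ := List.getElem?_eq_some_iff.mp hk
    have hle : (seg cs i j).length ≤ j + 1 - i := by
      simp [seg]
    omega
  rw [seg_getElem? cs i j k hlen] at hk
  have := h (i + k) (by omega) (by omega)
  rw [this] at hk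
  exact (Option.some_inj.mp hk).symm

lemma skipI_spec_aux (cs : List Char) (fuel : Nat) : ∀ (i j : Nat), j - i ≤ fuel → i < j →
    ∃ r : Nat, aSkipI cs fuel i j = (r : Int) ∧ i ≤ r ∧ r ≤ j - 1 ∧
      (∀ k, i ≤ k → k ≤ r → cs[k]? = cs[i]?) ∧ (r = j - 1 ∨ cs[r + 1]? ≠ cs[i]?) := by
  induction fuel with
  | zero => intro i j h1 h2; omega
  | succ n ih =>
    intro i j h1 h2
    rw [aSkipI]
    by_cases hcond : ((i : Int) + 1 < (j : Int) ∧
        PySem.List.pyGet? cs i = PySem.List.pyGet? cs ((i : Int) + 1))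
    · rw [if_pos hcond]
      obtain ⟨hlt, heq⟩ := hcond
      have hij2 : i + 1 < j := by exact_mod_cast hlt
      have hcast : ((i : Int) + 1) = ((i + 1 : Nat) : Int) := by push_cast; ring
      rw [hcast] at heq ⊢
      have heq' : cs[i + 1]? = cs[i]? := by
        rw [PySem.List.pyGet?_natCast, PySem.List.pyGet?_natCast] at heq
        exact heq.symm
      obtain ⟨r, hr, h3, h4, h5, h6⟩ := ih (i + 1) j (by omega) (by omega)
      refine ⟨r, hr, by omega, by omega, ?_, ?_⟩
      · intro k hk1 hk2
        rcases Nat.eq_or_lt_of_le hk1 with h | h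
        · rw [← h]
        · rw [h5 k (by omega) hk2, heq']
      · rcases h6 with h | h
        · exact Or.inl h
        · right; rw [heq'] at h; exact h
    · rw [if_neg hcond]
      push_neg at hcond
      refine ⟨i, rfl, le_refl i, by omega, ?_, ?_⟩
      · intro k hk1 hk2
        have : k = i := by omega
        rw [this]
      · by_cases hb : (i : Int) + 1 < (j : Int)
        · right
          have hne := hcond hb
          have hcast : ((i : Int) + 1) = ((i + 1 : Nat) : Int) := by push_cast; ring
          rw [hcast] at hne
          simp only [PySem.List.pyGet?_natCast] at hne
          exact fun hcontra => hne (hcontra.symm)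
        · left
          omega

lemma skipI_spec (cs : List Char) (i j : Nat) (hij : i < j) :
    ∃ r : Nat, aSkipI cs ((j : Int) - (i : Int)).toNat i j = (r : Int) ∧ i ≤ r ∧ r ≤ j - 1 ∧
      (∀ k, i ≤ k → k ≤ r → cs[k]? = cs[i]?) ∧ (r = j - 1 ∨ cs[r + 1]? ≠ cs[i]?) :=
  skipI_spec_aux cs ((j : Int) - (i : Int)).toNat i j (by omega) hij

lemma skipJ_spec_aux (cs : List Char) (fuel : Nat) : ∀ (i j : Nat), j - i ≤ fuel → i < j →
    ∃ r : Nat, aSkipJ cs fuel i j = (r : Int) ∧ i + 1 ≤ r ∧ r ≤ j ∧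
      (∀ k, r ≤ k → k ≤ j → cs[k]? = cs[j]?) ∧ (r = i + 1 ∨ cs[r - 1]? ≠ cs[j]?) := by
  induction fuel with
  | zero => intro i j h1 h2; omega
  | succ n ih =>
    intro i j h1 h2
    rw [aSkipJ]
    by_cases hcond : ((i : Int) < (j : Int) - 1 ∧
        PySem.List.pyGet? cs j = PySem.List.pyGet? cs ((j : Int) - 1))
    · rw [if_pos hcond]
      obtain ⟨hlt, heq⟩ := hcond
      have hij2' : i + 1 < j := by omega
      have hcast : ((j : Int) - 1) = ((j - 1 : Nat) : Int) := by
        have : 1 ≤ j := by omega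
        push_cast [this]; ring
      rw [hcast] at heq ⊢
      have heq' : cs[j - 1]? = cs[j]? := by
        rw [PySem.List.pyGet?_natCast, PySem.List.pyGet?_natCast] at heq
        exact heq.symm
      obtain ⟨r, hr, h3, h4, h5, h6⟩ := ih i (j - 1) (by omega) (by omega)
      refine ⟨r, hr, h3, by omega, ?_, ?_⟩
      · intro k hk1 hk2
        rcases Nat.lt_or_ge k j with h | h
        · rw [h5 k hk1 (by omega), heq']
        · have : k = j := by omega
          rw [this]
      · rcases h6 with h | h
        · exact Or.inl h
        · right; rw [heq'] at h; exact h
    · rw [if_neg hcond]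
      push_neg at hcond
      refine ⟨j, rfl, by omega, le_refl j, ?_, ?_⟩
      · intro k hk1 hk2
        have : k = j := by omega
        rw [this]
      · by_cases hb : (i : Int) < (j : Int) - 1
        · right
          have hne := hcond hb
          have hcast : ((j : Int) - 1) = ((j - 1 : Nat) : Int) := by
            have : 1 ≤ j := by omega
            push_cast [this]; ring
          rw [hcast] at hne
          simp only [PySem.List.pyGet?_natCast] at hne
          exact fun hcontra => hne (hcontra.symm)
        · left
          omega

lemma skipJ_spec (cs : List Char) (i j : Nat) (hij : i < j) :
    ∃ r : Nat, aSkipJ cs ((j : Int) - (i : Int)).toNat i j = (r : Int) ∧ i + 1 ≤ r ∧ r ≤ j ∧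
      (∀ k, r ≤ k → k ≤ j → cs[k]? = cs[j]?) ∧ (r = i + 1 ∨ cs[r - 1]? ≠ cs[j]?) :=
  skipJ_spec_aux cs ((j : Int) - (i : Int)).toNat i j (by omega) hij

lemma dropWhile_head_ne (c : Char) (l : List Char) (x : Char) (h0 : l[0]? = some x)
    (hx : x ≠ c) : l.dropWhile (· == c) = l := by
  cases l with
  | nil => simp at h0
  | cons a t =>
    simp only [List.getElem?_cons_zero, Option.some_inj] at h0
    subst h0
    simp [List.dropWhile_cons, hx]

lemma strip_step (cs : List Char) (i j : Nat) (hij : i < j) (hj : j < cs.length)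
    (hc : cs[i]? = cs[j]?) :
    ∃ i' j' : Nat, aSkipI cs ((j : Int) - (i : Int)).toNat i j = (i' : Int) ∧
      aSkipJ cs ((j : Int) - (i' : Int)).toNat i' j = (j' : Int) ∧
      i ≤ i' ∧ i' < j' ∧ j' ≤ j ∧
      bStrip ((seg cs i j).headD default) (seg cs i j) = seg cs (i' + 1) (j' - 1) := by
  obtain ⟨i', hI, hIi, hIj, hIall, hIexit⟩ := skipI_spec cs i j hij
  have hi'j : i' < j := by omega
  obtain ⟨j', hJ, hJi, hJj, hJall, hJexit⟩ := skipJ_spec cs i' j hi'j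
  have hilen : i < cs.length := by omega
  have hci : cs[i]? = some (cs[i]'hilen) := by simp
  set c := cs[i]'hilen with hcdef
  have hcj : cs[j]? = some c := by rw [← hc]; exact hci
  have hseg0 : (seg cs i j)[0]? = some c := by
    rw [seg_getElem? cs i j 0 (by omega)]
    simpa using hci
  have hheadD : (seg cs i j).headD default = c := by
    cases hs : seg cs i j with
    | nil => rw [hs] at hseg0; simp at hseg0
    | cons a t =>
      rw [hs] at hseg0
      simp only [List.getElem?_cons_zero, Option.some_inj] at hseg0
      simp [hseg0]
  refine ⟨i', j', hI, hJ, hIi, by omega, hJj, ?_⟩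
  rw [hheadD]
  by_cases hcase : i' = j - 1
  · -- the whole segment is one run of c: everything is stripped
    have hall : ∀ x ∈ seg cs i j, x = c := by
      apply seg_all_eq
      intro k hk1 hk2
      rcases Nat.lt_or_ge k j with h | h
      · rw [hIall k hk1 (by omega)]; exact hci
      · rw [show k = j by omega]; exact hcj
    have h1 : (seg cs i j).dropWhile (· == c) = [] :=
      List.dropWhile_eq_nil_iff.mpr (fun x hx => by simp [hall x hx])
    have h2 : seg cs (i' + 1) (j' - 1) = [] := by
      unfold seg
      rw [show j' - 1 + 1 - (i' + 1) = 0 by omega]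
      simp
    rw [h2]
    simp [bStrip, h1]
  · -- i' < j - 1 : a non-c character survives in the middle
    have hne1 : cs[i' + 1]? ≠ some c := by
      rcases hIexit with h | h
      · omega
      · rw [hci] at h; exact h
    have hj'ne : j' ≠ i' + 1 := by
      intro hcontra
      exact hne1 (by rw [← hcontra] at hne1 ⊢; rw [hJall j' (le_refl _) (by omega)]; exact hcj)
    have hij' : i' + 2 ≤ j' := by omega
    have hne2 : cs[j' - 1]? ≠ some c := by
      rcases hJexit with h | h
      · omega
      · rw [hcj] at h; exact h
    have hlt2 : i' + 1 < cs.length := by omega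
    have hx : cs[i' + 1]? = some (cs[i' + 1]'hlt2) := by simp
    set x := cs[i' + 1]'hlt2 with hxdef
    have hxne : x ≠ c := fun h => hne1 (by rw [hx, h])
    have hlt3 : j' - 1 < cs.length := by omega
    have hy : cs[j' - 1]? = some (cs[j' - 1]'hlt3) := by simp
    set y := cs[j' - 1]'hlt3 with hydef
    have hyne : y ≠ c := fun h => hne2 (by rw [hy, h])
    -- left strip removes exactly seg i i'
    have hsplit1 : seg cs i j = seg cs i i' ++ seg cs (i' + 1) j :=
      seg_split cs i i' j (by omega) (by omega)
    have hfrontnil : (seg cs i i').dropWhile (· == c) = [] :=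
      List.dropWhile_eq_nil_iff.mpr (fun z hz => by
        simp [seg_all_eq cs i i' c (fun k hk1 hk2 => by rw [hIall k hk1 hk2]; exact hci) z hz])
    have hdrop1 : (seg cs i j).dropWhile (· == c) = seg cs (i' + 1) j := by
      rw [hsplit1, List.dropWhile_append, hfrontnil]
      simp only [List.isEmpty_nil, if_true]
      exact dropWhile_head_ne c _ x
        (by rw [seg_getElem? cs (i' + 1) j 0 (by omega)]; simpa using hx) hxne
    -- right strip removes exactly seg j' j
    have hsplit2 : seg cs (i' + 1) j = seg cs (i' + 1) (j' - 1) ++ seg cs j' j := by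
      have h := seg_split cs (i' + 1) (j' - 1) j (by omega) (by omega)
      rwa [show j' - 1 + 1 = j' by omega] at h
    have hbacknil : ((seg cs j' j).reverse).dropWhile (· == c) = [] :=
      List.dropWhile_eq_nil_iff.mpr (fun z hz => by
        simp [seg_all_eq cs j' j c
          (fun k hk1 hk2 => by rw [hJall k hk1 hk2]; exact hcj) z (List.mem_reverse.mp hz)])
    have hAlen : (seg cs (i' + 1) (j' - 1)).length = j' - i' - 1 := by
      rw [seg_length cs (i' + 1) (j' - 1) (by omega) (by omega)]
      omega
    have hAlast : (seg cs (i' + 1) (j' - 1)).reverse[0]? = some y := by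
      rw [List.getElem?_reverse (by omega), hAlen,
        show j' - i' - 1 - 1 - 0 = j' - i' - 2 by omega,
        seg_getElem? cs (i' + 1) (j' - 1) (j' - i' - 2) (by omega),
        show i' + 1 + (j' - i' - 2) = j' - 1 by omega]
      exact hy
    unfold bStrip
    rw [hdrop1, hsplit2, List.reverse_append, List.dropWhile_append, hbacknil]
    simp only [List.isEmpty_nil, if_true]
    rw [dropWhile_head_ne c _ y hAlast hyne, List.reverse_reverse]

lemma seg_first (cs : List Char) (i j : Nat) (h1 : i ≤ j) (h3 : j < cs.length) :
    PySem.List.pyGet? (seg cs i j) 0 = cs[i]? := by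
  rw [PySem.List.pyGet?_zero, seg_getElem? cs i j 0 (by omega), Nat.add_zero]

lemma seg_last (cs : List Char) (i j : Nat) (h1 : i ≤ j) (h3 : j < cs.length) :
    PySem.List.pyGet? (seg cs i j) (-1) = cs[j]? := by
  rw [PySem.List.pyGet?_neg_one, List.getLast?_eq_getElem?,
    seg_length cs i j (by omega) h3,
    show j + 1 - i - 1 = j - i by omega,
    seg_getElem? cs i j (j - i) (by omega),
    show i + (j - i) = j by omega]

lemma bLoop_stop (fuel : Nat) (l : List Char) (h : ¬ (2 ≤ l.length ∧
    PySem.List.pyGet? l 0 = PySem.List.pyGet? l (-1))) : bLoop fuel l = (l.length : Int) := by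
  cases fuel with
  | zero => rfl
  | succ f => rw [bLoop, if_neg h]

lemma aLoop_stop_case (cs : List Char) (fa fb : Nat) (i j : Nat) (h2 : i ≤ j + 1)
    (hji : ¬ i < j) (h3 : j < cs.length) :
    aLoop cs (fa + 1) i j = bLoop fb (seg cs i j) := by
  rw [aLoop, if_neg (by exact_mod_cast hji : ¬ ((i : Int) < (j : Int)))]
  rw [bLoop_stop fb _ (by
    intro hcond
    have := hcond.1
    rw [seg_length cs i j h2 h3] at this
    omega)]
  rw [seg_length cs i j h2 h3]
  omega

lemma main_lemma (cs : List Char) (fa : Nat) : ∀ (i j fb : Nat), j + 1 - i ≤ fa →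
    i ≤ j + 1 → j < cs.length → j + 1 - i ≤ fb →
    aLoop cs fa i j = bLoop fb (seg cs i j) := by
  induction fa with
  | zero =>
    intro i j fb h1 h2 h3 h4
    have hij : i = j + 1 := by omega
    rw [aLoop, bLoop_stop fb _ (by
      intro hcond
      have := hcond.1
      rw [seg_length cs i j h2 h3] at this
      omega)]
    rw [seg_length cs i j h2 h3]
    omega
  | succ n ih =>
    intro i j fb h1 h2 h3 h4
    by_cases hlt : i < j
    · rw [aLoop, if_pos (by exact_mod_cast hlt : ((i : Int) < (j : Int)))]
      by_cases heq : PySem.List.pyGet? cs (i : Int) = PySem.List.pyGet? cs (j : Int)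
      · rw [if_pos heq]
        have hc : cs[i]? = cs[j]? := by
          rw [PySem.List.pyGet?_natCast, PySem.List.pyGet?_natCast] at heq
          exact heq
        obtain ⟨i', j', hI, hJ, h5, h6, h7, hstrip⟩ := strip_step cs i j hlt h3 hc
        simp only [hI, hJ]
        have e1 : ((i' : Int) + 1) = ((i' + 1 : Nat) : Int) := by push_cast; ring
        have e2 : ((j' : Int) - 1) = ((j' - 1 : Nat) : Int) := by omega
        obtain ⟨f, rfl⟩ : ∃ f, fb = f + 1 := ⟨fb - 1, by omega⟩
        rw [e1, e2, ih (i' + 1) (j' - 1) f (by omega) (by omega) (by omega) (by omega)]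
        have hright : bLoop (f + 1) (seg cs i j) =
            bLoop f (bStrip ((seg cs i j).headD default) (seg cs i j)) := by
          rw [bLoop]
          rw [if_pos ⟨by rw [seg_length cs i j h2 h3]; omega,
            by rw [seg_first cs i j (by omega) h3, seg_last cs i j (by omega) h3]; exact hc⟩]
        rw [hright, hstrip]
      · rw [if_neg heq]
        rw [bLoop_stop fb _ (by
          intro hcond
          apply heq
          have := hcond.2
          rw [seg_first cs i j (by omega) h3, seg_last cs i j (by omega) h3] at this
          rw [PySem.List.pyGet?_natCast, PySem.List.pyGet?_natCast]
          exact this)]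
        rw [seg_length cs i j h2 h3]
        omega
    · exact aLoop_stop_case cs n fb i j h2 hlt h3

-- ===== VERDICT (by name: the statement is the Claim_ definition above) =====
theorem minimumLength_spec : Claim_equal_minimumLength := by
  intro s _
  unfold Spec_minimumLength minimumLength minimumLength_alt
  by_cases hnil : s.toList = []
  · rw [hnil]
    norm_num [aLoop, bLoop]
  · have hlen : 1 ≤ s.toList.length := by
      cases h : s.toList with
      | nil => exact absurd h hnil
      | cons a t => simp [h]
    rw [show ((s.toList.length : Int) - 1) = ((s.toList.length - 1 : Nat) : Int) by omega,
      show (0 : Int) = ((0 : Nat) : Int) from rfl,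
      main_lemma s.toList (s.toList.length + 1) 0 (s.toList.length - 1) s.toList.length
        (by omega) (by omega) (by omega) (by omega)]
    congr 1
    unfold seg
    rw [show s.toList.length - 1 + 1 - 0 = s.toList.length by omega]
    simp
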